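-- pv_equiv track=rewrite | github.com/Elie-Koivunen/isi-pub | serials-get.py | parse_nodes_spec
-- ===== SOURCE A (Python) =====
-- def parse_nodes_spec(spec: str):
--     nodes = set()
--     for part in spec.split(","):
--         part = part.strip()
--         if not part:
--             continue
--         if "-" in part:
--             a, b = part.split("-", 1)
--             a = int(a); b = int(b)
--             if a > b: a, b = b, a
--             nodes.update(range(a, b + 1))
--         else:
--             nodes.add(int(part))
--     return sorted(nodes)
-- ===== SOURCE B (Python) =====
-- def parse_nodes_spec(spec: str):
--     # B: collect [start, end] intervals, sort by start, merge-and-expand in one pass.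
--     intervals = []
--     for part in spec.split(","):
--         part = part.strip()
--         if not part:
--             continue
--         if "-" in part:
--             a, b = part.split("-", 1)
--             a = int(a); b = int(b)
--             if a > b: a, b = b, a
--             intervals.append((a, b))
--         else:
--             x = int(part)
--             intervals.append((x, x))
--     out = []
--     cur = None
--     for iv in sorted(intervals, key=lambda iv: iv[0]):
--         if cur is None:
--             cur = iv
--         elif iv[0] <= cur[1] + 1:
--             cur = (cur[0], max(cur[1], iv[1]))
--         else:
--             out.extend(range(cur[0], cur[1] + 1))
--             cur = iv
--     if cur is not None:
--         out.extend(range(cur[0], cur[1] + 1))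
--     return out
-- ===== Notes on version B (the rewrite author's own statement) =====
-- stated objective: alternative
-- what changed: B accumulates (start,end) intervals instead of inserting every integer of each range into a set, then sorts the intervals by start and merges-and-expands them in one pass, so no set membership tests or final set sort over all expanded integers are needed.
import Mathlib
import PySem

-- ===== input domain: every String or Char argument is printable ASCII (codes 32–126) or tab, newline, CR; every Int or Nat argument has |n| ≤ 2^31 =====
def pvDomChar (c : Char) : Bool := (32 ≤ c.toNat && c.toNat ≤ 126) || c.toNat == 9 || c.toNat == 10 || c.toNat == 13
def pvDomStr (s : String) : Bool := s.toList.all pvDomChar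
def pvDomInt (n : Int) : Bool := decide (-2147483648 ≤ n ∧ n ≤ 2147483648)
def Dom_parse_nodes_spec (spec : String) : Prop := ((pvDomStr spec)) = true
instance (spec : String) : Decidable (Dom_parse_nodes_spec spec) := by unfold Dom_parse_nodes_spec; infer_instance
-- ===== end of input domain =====

-- B keeps A's per-part parsing but accumulates (start,end) intervals instead of a set,
-- then sorts by start and merges-and-expands in one pass (objective: alternative data structure).

-- ===== PORT A =====
-- one iteration of A's for-loop: none = the ValueError of int()
def pvStepA (nodes : PySem.Set Int) (part0 : String) : Option (PySem.Set Int) :=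
  if PySem.Str.strip part0 = "" then some nodes
  else if PySem.Str.isIn "-" (PySem.Str.strip part0) then
    match PySem.Str.splitMax? (PySem.Str.strip part0) "-" 1 with
    | some [sa, sb] =>
      match PySem.Int.ofStr? sa, PySem.Int.ofStr? sb with
      | some a, some b =>
        if a > b then some (PySem.Set.update nodes (PySem.List.pyRange b (a + 1) 1))
        else some (PySem.Set.update nodes (PySem.List.pyRange a (b + 1) 1))
      | _, _ => none
    | _ => none
  else
    match PySem.Int.ofStr? (PySem.Str.strip part0) with
    | some n => some (PySem.Set.add nodes n)
    | none => none

def pvLoopA : List String → PySem.Set Int → Option (PySem.Set Int)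
  | [], nodes => some nodes
  | p :: ps, nodes =>
    match pvStepA nodes p with
    | none => none
    | some s => pvLoopA ps s

def parse_nodes_spec (spec : String) : List Int :=
  match pvLoopA ((PySem.Str.split? spec ",").getD []) [] with
  | some nodes => PySem.List.sorted nodes (fun x => x)
  | none => []

-- ===== PORT B =====
-- one iteration of B's first loop: same parsing as A, but appends an interval
def pvStepB (ivs : List (Int × Int)) (part0 : String) : Option (List (Int × Int)) :=
  if PySem.Str.strip part0 = "" then some ivs
  else if PySem.Str.isIn "-" (PySem.Str.strip part0) then
    match PySem.Str.splitMax? (PySem.Str.strip part0) "-" 1 with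
    | some [sa, sb] =>
      match PySem.Int.ofStr? sa, PySem.Int.ofStr? sb with
      | some a, some b =>
        if a > b then some (ivs ++ [(b, a)]) else some (ivs ++ [(a, b)])
      | _, _ => none
    | _ => none
  else
    match PySem.Int.ofStr? (PySem.Str.strip part0) with
    | some x => some (ivs ++ [(x, x)])
    | none => none

def pvLoopB : List String → List (Int × Int) → Option (List (Int × Int))
  | [], ivs => some ivs
  | p :: ps, ivs =>
    match pvStepB ivs p with
    | none => none
    | some s => pvLoopB ps s

-- one iteration of B's merge loop: state = (out, cur)
def pvMergeStep (st : List Int × Option (Int × Int)) (iv : Int × Int) : List Int × Option (Int × Int) :=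
  match st.2 with
  | none => (st.1, some iv)
  | some cd =>
    if iv.1 ≤ cd.2 + 1 then (st.1, some (cd.1, max cd.2 iv.2))
    else (st.1 ++ PySem.List.pyRange cd.1 (cd.2 + 1) 1, some iv)

-- the trailing 'if cur is not None: out.extend(range(...))'
def pvFinish (st : List Int × Option (Int × Int)) : List Int :=
  match st.2 with
  | none => st.1
  | some cd => st.1 ++ PySem.List.pyRange cd.1 (cd.2 + 1) 1

def parse_nodes_spec_alt (spec : String) : List Int :=
  match pvLoopB ((PySem.Str.split? spec ",").getD []) [] with
  | some ivs =>
    pvFinish ((PySem.List.sorted ivs (fun iv => iv.1)).foldl pvMergeStep ([], none))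
  | none => []

-- ===== PRECONDITION & SPEC =====
-- Pre_ excludes exactly the inputs where A raises ValueError: a non-empty stripped part
-- whose int() pieces do not parse.
def pvPartOk (part0 : String) : Bool :=
  if PySem.Str.strip part0 = "" then true
  else if PySem.Str.isIn "-" (PySem.Str.strip part0) then
    match PySem.Str.splitMax? (PySem.Str.strip part0) "-" 1 with
    | some [sa, sb] => (PySem.Int.ofStr? sa).isSome && (PySem.Int.ofStr? sb).isSome
    | _ => false
  else (PySem.Int.ofStr? (PySem.Str.strip part0)).isSome

def Pre_parse_nodes_spec (spec : String) : Prop :=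
  ((PySem.Str.split? spec ",").getD []).all pvPartOk = true

instance (spec : String) : Decidable (Pre_parse_nodes_spec spec) := by
  unfold Pre_parse_nodes_spec; infer_instance

def pvWitness_parse_nodes_spec : String := "1-3, 7 ,,5-4"

def Spec_parse_nodes_spec (spec : String) (out : List Int) : Prop := out = parse_nodes_spec_alt spec
instance (spec : String) (out : List Int) : Decidable (Spec_parse_nodes_spec spec out) := by
  unfold Spec_parse_nodes_spec; infer_instance

-- ===== CLAIM (what is proved, stated in full; the proofs are below) =====
def Claim_equal_parse_nodes_spec : Prop :=
  ∀ (spec : String), Dom_parse_nodes_spec spec → Pre_parse_nodes_spec spec →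
    Spec_parse_nodes_spec spec (parse_nodes_spec spec)

-- ===== LEMMAS AND PROOFS =====

-- n is covered by one of the intervals
def pvCover (ivs : List (Int × Int)) (n : Int) : Prop := ∃ p ∈ ivs, p.1 ≤ n ∧ n ≤ p.2

lemma pvCover_nil (n : Int) : ¬ pvCover [] n := by simp [pvCover]

lemma pvCover_append (ivs : List (Int × Int)) (q : Int × Int) (n : Int) :
    pvCover (ivs ++ [q]) n ↔ pvCover ivs n ∨ (q.1 ≤ n ∧ n ≤ q.2) := by
  simp only [pvCover, List.mem_append, List.mem_singleton]
  constructor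
  · rintro ⟨p, hp | hp, h⟩
    · exact Or.inl ⟨p, hp, h⟩
    · subst hp; exact Or.inr h
  · rintro (⟨p, hp, h⟩ | h)
    · exact ⟨p, Or.inl hp, h⟩
    · exact ⟨q, Or.inr rfl, h⟩

lemma pvRange_mem (a b n : Int) :
    n ∈ PySem.List.pyRange a (b + 1) 1 ↔ a ≤ n ∧ n ≤ b := by
  rw [PySem.List.mem_pyRange_iff_of_pos (by norm_num)]
  constructor
  · rintro ⟨h1, h2, _⟩; exact ⟨h1, by omega⟩
  · rintro ⟨h1, h2⟩; exact ⟨h1, by omega, by simp⟩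

-- the two per-part steps run in lockstep on an admissible part
lemma pvStep_par (p : String) (hp : pvPartOk p = true) (nodes : PySem.Set Int)
    (ivs : List (Int × Int)) :
    (pvStepA nodes p = some nodes ∧ pvStepB ivs p = some ivs) ∨
    ∃ q nodes', q.1 ≤ q.2 ∧ pvStepA nodes p = some nodes' ∧
      pvStepB ivs p = some (ivs ++ [q]) ∧ (nodes.Nodup → nodes'.Nodup) ∧
      (∀ m, m ∈ nodes' ↔ m ∈ nodes ∨ (q.1 ≤ m ∧ m ≤ q.2)) := by
  unfold pvPartOk at hp
  unfold pvStepA pvStepB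
  by_cases he : PySem.Str.strip p = ""
  · rw [if_pos he, if_pos he]
    exact Or.inl ⟨rfl, rfl⟩
  · rw [if_neg he, if_neg he]
    rw [if_neg he] at hp
    by_cases hd : PySem.Str.isIn "-" (PySem.Str.strip p) = true
    · rw [if_pos hd, if_pos hd]
      rw [if_pos hd] at hp
      cases hsp : PySem.Str.splitMax? (PySem.Str.strip p) "-" 1 with
      | none => rw [hsp] at hp; simp at hp
      | some pieces =>
        rw [hsp] at hp
        match pieces with
        | [] => simp at hp
        | [_] => simp at hp
        | _ :: _ :: _ :: _ => simp at hp
        | [sa, sb] =>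
          simp only [Bool.and_eq_true, Option.isSome_iff_exists] at hp
          obtain ⟨⟨a, ha⟩, ⟨b, hb⟩⟩ := hp
          dsimp only
          rw [ha, hb]
          dsimp only
          by_cases hab : a > b
          · rw [if_pos hab, if_pos hab]
            refine Or.inr ⟨(b, a), _, by omega, rfl, rfl,
              fun h => PySem.Set.nodup_update _ _ h, fun m => ?_⟩
            rw [PySem.Set.mem_update, pvRange_mem]
          · rw [if_neg hab, if_neg hab]
            refine Or.inr ⟨(a, b), _, by omega, rfl, rfl,
              fun h => PySem.Set.nodup_update _ _ h, fun m => ?_⟩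
            rw [PySem.Set.mem_update, pvRange_mem]
    · rw [if_neg hd, if_neg hd]
      rw [if_neg hd] at hp
      rw [Option.isSome_iff_exists] at hp
      obtain ⟨x, hx⟩ := hp
      rw [hx]
      refine Or.inr ⟨(x, x), _, le_refl _, rfl, rfl,
        fun h => PySem.Set.nodup_add _ _ h, fun m => ?_⟩
      rw [PySem.Set.mem_add]
      constructor
      · rintro (h | h)
        · exact Or.inl h
        · exact Or.inr (by subst h; exact ⟨le_refl _, le_refl _⟩)
      · rintro (h | ⟨h1, h2⟩)
        · exact Or.inl h
        · exact Or.inr (le_antisymm h2 h1)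

-- the two first loops run in lockstep: on success the set's members are exactly the covered integers
lemma pvLoops_rel : ∀ (parts : List String) (nodes : PySem.Set Int) (ivs : List (Int × Int)),
    parts.all pvPartOk = true →
    (∀ p ∈ ivs, p.1 ≤ p.2) →
    nodes.Nodup →
    (∀ n, n ∈ nodes ↔ pvCover ivs n) →
    ∃ nodes' ivs', pvLoopA parts nodes = some nodes' ∧ pvLoopB parts ivs = some ivs' ∧
      (∀ p ∈ ivs', p.1 ≤ p.2) ∧ nodes'.Nodup ∧ (∀ n, n ∈ nodes' ↔ pvCover ivs' n) := by
  intro parts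
  induction parts with
  | nil => exact fun nodes ivs _ hwf hnd hmem => ⟨nodes, ivs, rfl, rfl, hwf, hnd, hmem⟩
  | cons p ps ih =>
    intro nodes ivs hok hwf hnd hmem
    simp only [List.all_cons, Bool.and_eq_true] at hok
    obtain ⟨hp, hps⟩ := hok
    rcases pvStep_par p hp nodes ivs with ⟨hA, hB⟩ | ⟨q, nodes1, hq, hA, hB, hnd1, hmem1⟩
    · unfold pvLoopA pvLoopB
      rw [hA, hB]
      exact ih nodes ivs hps hwf hnd hmem
    · unfold pvLoopA pvLoopB
      rw [hA, hB]
      apply ih nodes1 (ivs ++ [q]) hps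
      · intro r hr
        rcases List.mem_append.mp hr with h | h
        · exact hwf r h
        · simp at h; subst h; exact hq
      · exact hnd1 hnd
      · intro n
        rw [hmem1 n, hmem n, pvCover_append]

lemma pvRange_pairwise (a b : Int) :
    (PySem.List.pyRange a b 1).Pairwise (· < ·) := by
  rw [PySem.List.pyRange_of_pos a b (by norm_num), List.pairwise_map]
  exact List.Pairwise.imp (by intro m n h; omega) List.pairwise_lt_range


-- invariant of B's merge loop
lemma pvMerge_inv : ∀ (ivs : List (Int × Int)) (out : List Int) (c d : Int),
    (∀ p ∈ ivs, p.1 ≤ p.2) →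
    ivs.Pairwise (fun p q => p.1 ≤ q.1) →
    (∀ p ∈ ivs, c ≤ p.1) →
    c ≤ d →
    out.Pairwise (· < ·) →
    (∀ x ∈ out, x < c) →
    (pvFinish (ivs.foldl pvMergeStep (out, some (c, d)))).Pairwise (· < ·) ∧
    (∀ n, n ∈ pvFinish (ivs.foldl pvMergeStep (out, some (c, d))) ↔
      (n ∈ out ∨ (c ≤ n ∧ n ≤ d) ∨ pvCover ivs n)) := by
  intro ivs
  induction ivs with
  | nil =>
    intro out c d _ _ _ hcd hpw hlt
    constructor
    · unfold pvFinish
      simp only [List.foldl_nil]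
      rw [List.pairwise_append]
      refine ⟨hpw, pvRange_pairwise _ _, ?_⟩
      intro x hx y hy
      rw [pvRange_mem] at hy
      have := hlt x hx
      omega
    · intro n
      unfold pvFinish
      simp only [List.foldl_nil, List.mem_append, pvRange_mem]
      have := pvCover_nil n
      tauto
  | cons q rest ih =>
    intro out c d hwf hsort hge hcd hpw hlt
    have hqwf : q.1 ≤ q.2 := hwf q (by simp)
    have hcq : c ≤ q.1 := hge q (by simp)
    rw [List.pairwise_cons] at hsort
    obtain ⟨hqrest, hsrest⟩ := hsort
    simp only [List.foldl_cons]
    by_cases hm : q.1 ≤ d + 1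
    · -- merge into the current interval
      have hstep : pvMergeStep (out, some (c, d)) q = (out, some (c, max d q.2)) := by
        simp [pvMergeStep, hm]
      rw [hstep]
      have := ih out c (max d q.2) (fun p hp => hwf p (by simp [hp])) hsrest
        (fun p hp => le_trans hcq (hqrest p hp)) (le_trans hcd (le_max_left _ _)) hpw hlt
      refine ⟨this.1, fun n => ?_⟩
      rw [(this.2 n)]
      constructor
      · rintro (h | ⟨h1, h2⟩ | h)
        · exact Or.inl h
        · by_cases h3 : n ≤ d
          · exact Or.inr (Or.inl ⟨h1, h3⟩)
          · exact Or.inr (Or.inr ⟨q, by simp, by omega, by omega⟩)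
        · rcases h with ⟨p, hp, h1, h2⟩
          exact Or.inr (Or.inr ⟨p, by simp [hp], h1, h2⟩)
      · rintro (h | ⟨h1, h2⟩ | ⟨p, hp, h1, h2⟩)
        · exact Or.inl h
        · exact Or.inr (Or.inl ⟨h1, le_trans h2 (le_max_left _ _)⟩)
        · rcases List.mem_cons.mp hp with h | h
          · subst h
            exact Or.inr (Or.inl ⟨by omega, le_trans h2 (le_max_right _ _)⟩)
          · exact Or.inr (Or.inr ⟨p, h, h1, h2⟩)
    · -- flush [c..d] and start a new interval
      have hstep : pvMergeStep (out, some (c, d)) q =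
          (out ++ PySem.List.pyRange c (d + 1) 1, some (q.1, q.2)) := by
        simp [pvMergeStep, hm]
      rw [hstep]
      have hpw' : (out ++ PySem.List.pyRange c (d + 1) 1).Pairwise (· < ·) := by
        rw [List.pairwise_append]
        refine ⟨hpw, pvRange_pairwise _ _, ?_⟩
        intro x hx y hy
        rw [pvRange_mem] at hy
        have := hlt x hx
        omega
      have hlt' : ∀ x ∈ out ++ PySem.List.pyRange c (d + 1) 1, x < q.1 := by
        intro x hx
        rcases List.mem_append.mp hx with h | h
        · have := hlt x h; omega
        · rw [pvRange_mem] at h; omega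
      have := ih (out ++ PySem.List.pyRange c (d + 1) 1) q.1 q.2
        (fun p hp => hwf p (by simp [hp])) hsrest hqrest hqwf hpw' hlt'
      refine ⟨this.1, fun n => ?_⟩
      rw [(this.2 n)]
      simp only [List.mem_append, pvRange_mem]
      constructor
      · rintro ((h | h) | h | h)
        · exact Or.inl h
        · exact Or.inr (Or.inl ⟨h.1, by omega⟩)
        · exact Or.inr (Or.inr ⟨q, by simp, h⟩)
        · rcases h with ⟨p, hp, h1, h2⟩
          exact Or.inr (Or.inr ⟨p, by simp [hp], h1, h2⟩)
      · rintro (h | ⟨h1, h2⟩ | ⟨p, hp, h1, h2⟩)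
        · exact Or.inl (Or.inl h)
        · exact Or.inl (Or.inr ⟨h1, by omega⟩)
        · rcases List.mem_cons.mp hp with h | h
          · subst h
            exact Or.inr (Or.inl ⟨h1, h2⟩)
          · exact Or.inr (Or.inr ⟨p, h, h1, h2⟩)

-- the whole sort-merge-expand phase: a strictly increasing list with exactly the covered members
lemma pvPhase2 (ivs : List (Int × Int)) (hwf : ∀ p ∈ ivs, p.1 ≤ p.2) :
    (pvFinish ((PySem.List.sorted ivs (fun iv => iv.1)).foldl pvMergeStep ([], none))).Pairwise (· < ·) ∧
    (∀ n, n ∈ pvFinish ((PySem.List.sorted ivs (fun iv => iv.1)).foldl pvMergeStep ([], none)) ↔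
      pvCover ivs n) := by
  have hperm : (PySem.List.sorted ivs (fun iv => iv.1)).Perm ivs :=
    PySem.List.sorted_perm _ _ _
  have hwf' : ∀ p ∈ PySem.List.sorted ivs (fun iv => iv.1), p.1 ≤ p.2 :=
    fun p hp => hwf p (hperm.mem_iff.mp hp)
  have hsort : (PySem.List.sorted ivs (fun iv => iv.1)).Pairwise (fun p q => p.1 ≤ q.1) :=
    PySem.List.sorted_pairwise _ _
  have hcover : ∀ n, pvCover (PySem.List.sorted ivs (fun iv => iv.1)) n ↔ pvCover ivs n := by
    intro n
    unfold pvCover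
    constructor <;> rintro ⟨p, hp, h⟩ <;> exact ⟨p, by rw [hperm.mem_iff] at *; tauto, h⟩
  cases hs : PySem.List.sorted ivs (fun iv => iv.1) with
  | nil =>
    rw [hs] at hcover
    simp only [List.foldl_nil]
    constructor
    · simp [pvFinish]
    · intro n
      rw [← hcover n]
      simp [pvFinish, pvCover]
  | cons q rest =>
    rw [hs] at hwf' hsort hcover
    rw [List.pairwise_cons] at hsort
    simp only [List.foldl_cons]
    have hstep : pvMergeStep ([], none) q = ([], some (q.1, q.2)) := by
      simp [pvMergeStep]
    rw [hstep]
    have := pvMerge_inv rest [] q.1 q.2 (fun p hp => hwf' p (by simp [hp])) hsort.2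
      hsort.1 (hwf' q (by simp)) (by simp) (by simp)
    refine ⟨this.1, fun n => ?_⟩
    rw [(this.2 n), ← hcover n]
    unfold pvCover
    simp only [List.not_mem_nil, false_or, List.mem_cons]
    constructor
    · rintro (h | ⟨p, hp, h⟩)
      · exact ⟨q, Or.inl rfl, h⟩
      · exact ⟨p, Or.inr hp, h⟩
    · rintro ⟨p, hp | hp, h⟩
      · subst hp; exact Or.inl h
      · exact Or.inr ⟨p, hp, h⟩

-- ===== VERDICT (by name: the statement is the Claim_ definition above) =====
theorem parse_nodes_spec_spec : Claim_equal_parse_nodes_spec := by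
  intro spec _ hpre
  unfold Pre_parse_nodes_spec at hpre
  unfold Spec_parse_nodes_spec parse_nodes_spec parse_nodes_spec_alt
  obtain ⟨nodes', ivs', hA, hB, hwf, hnd, hmem⟩ :=
    pvLoops_rel ((PySem.Str.split? spec ",").getD []) [] [] hpre
      (by simp) (by simp) (by intro n; simp [pvCover])
  rw [hA, hB]
  obtain ⟨hpw, hm⟩ := pvPhase2 ivs' hwf
  set L := pvFinish ((PySem.List.sorted ivs' (fun iv => iv.1)).foldl pvMergeStep ([], none)) with hL
  have hLnd : L.Nodup := hpw.imp ne_of_lt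
  have hperm : L.Perm nodes' := by
    rw [List.perm_ext_iff_of_nodup hLnd hnd]
    intro n
    rw [hm n, hmem n]
  exact (PySem.List.sorted_eq_of_perm_of_pairwise_lt nodes' L (fun x => x) hperm hpw)
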